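-- pv_equiv track=rewrite | github.com/yevhenbuleiko/flask-warp | app/helpers/common.py | list_matching_keys
-- ===== SOURCE A (Python) =====
-- def list_matching_keys(src_list: list):
-- 	''' Get List Of Matching Keys From List '''
-- 	maching = set()
-- 	checked_item = src_list.pop()
-- 	for i, val in enumerate(src_list):
-- 		if checked_item in src_list[i:]:
-- 			maching.add(checked_item)
-- 		checked_item = val
-- 	return maching
-- ===== SOURCE B (Python) =====
-- def list_matching_keys(src_list: list):
--     ''' Get List Of Matching Keys From List (single counting pass; does not mutate src_list) '''
--     last = src_list[-1]
--     rest = src_list[:-1]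
--     matching = set()
--     if last in rest:
--         matching.add(last)
--     counts = {}
--     for x in rest:
--         counts[x] = counts.get(x, 0) + 1
--     for x, c in counts.items():
--         if c > 1:
--             matching.add(x)
--     return matching
-- ===== Notes on version B (the rewrite author's own statement) =====
-- stated objective: faster
-- what changed: A scans a suffix slice of the list for each index (quadratic membership tests plus slice copies); B makes one counting pass with a dict over the popped-off prefix plus a single membership test for the last element, and B does not mutate src_list (the return value is what is proved equal).
import Mathlib
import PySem

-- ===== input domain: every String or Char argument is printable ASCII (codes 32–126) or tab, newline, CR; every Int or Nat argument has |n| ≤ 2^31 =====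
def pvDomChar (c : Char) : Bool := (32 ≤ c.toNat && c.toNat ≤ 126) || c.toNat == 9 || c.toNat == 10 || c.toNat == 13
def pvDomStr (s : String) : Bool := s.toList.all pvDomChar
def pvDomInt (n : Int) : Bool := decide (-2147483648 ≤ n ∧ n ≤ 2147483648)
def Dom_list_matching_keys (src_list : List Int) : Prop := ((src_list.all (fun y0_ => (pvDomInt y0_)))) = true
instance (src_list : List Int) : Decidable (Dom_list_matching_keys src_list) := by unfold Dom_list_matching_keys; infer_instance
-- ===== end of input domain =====

-- B replaces A's quadratic per-index suffix-membership scan by one counting pass over the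
-- popped-off prefix (objective: faster). A pops src_list in place; B does not mutate — the
-- equivalence proved here is about the RETURN value only.

-- ===== PORT A =====
def list_matching_keys (src_list : List Int) : List Int :=
  -- maching = set(); checked_item = src_list.pop()  (raises IndexError on [])
  match PySem.List.pop? src_list (-1) with
  | none => []  -- IndexError; excluded by Pre_
  | some (checked0, rest) =>
    -- for i, val in enumerate(src_list): if checked_item in src_list[i:]: maching.add(checked_item); checked_item = val
    ((PySem.List.enumerate rest 0).foldl
      (fun (st : List Int × Int) iv =>
        ((if st.2 ∈ PySem.List.slice rest (some iv.1) none then PySem.Set.add st.1 st.2 else st.1),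
         iv.2))
      (PySem.Set.empty, checked0)).1

-- ===== PORT B =====
def list_matching_keys_alt (src_list : List Int) : List Int :=
  match PySem.List.pyGet? src_list (-1) with
  | none => []  -- IndexError on []; excluded by Pre_
  | some last =>
    let rest := PySem.List.slice src_list none (some (-1))
    let matching := if last ∈ rest then PySem.Set.add PySem.Set.empty last else PySem.Set.empty
    let counts := rest.foldl (fun (d : PySem.Dict Int Int) x => d.modify x 0 (fun c => c + 1)) PySem.Dict.empty
    counts.items.foldl (fun m kv => if kv.2 > 1 then PySem.Set.add m kv.1 else m) matching

-- ===== PRECONDITION & SPEC =====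
-- A immediately pops from src_list, so it raises IndexError on the empty list; Pre_ excludes exactly that.
def Pre_list_matching_keys (src_list : List Int) : Prop := src_list ≠ []
instance (src_list : List Int) : Decidable (Pre_list_matching_keys src_list) := by unfold Pre_list_matching_keys; infer_instance
def pvWitness_list_matching_keys : List Int := ([1, 2, 1])

-- A raises IndexError on the empty list; B's natural value there would also raise (src_list[-1]),
-- so no Raises_ block is claimed.

def Spec_list_matching_keys (src_list : List Int) (out : List Int) : Prop := out = list_matching_keys_alt src_list
instance (src_list : List Int) (out : List Int) : Decidable (Spec_list_matching_keys src_list out) := by unfold Spec_list_matching_keys; infer_instance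

-- ===== CLAIM (what is proved, stated in full; the proofs are below) =====
def Claim_equal_list_matching_keys : Prop := ∀ (src_list : List Int), Dom_list_matching_keys src_list → Pre_list_matching_keys src_list → Spec_list_matching_keys src_list (list_matching_keys src_list)

-- ===== LEMMAS AND PROOFS =====

-- the elements of l that have an equal element strictly later in l, one entry per such position
def pvCollect (l : List Int) : List Int :=
  match l with
  | [] => []
  | v :: t => (if v ∈ t then [v] else []) ++ pvCollect t

-- A's loop over `enumerate rest k` with prefix of length k already consumed
theorem pvA_loop (rest : List Int) : ∀ (t : List Int) (k : Nat), rest.drop k = t →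
    ∀ (S : List Int) (c : Int),
    ((PySem.List.enumerate t (k : Int)).foldl
      (fun (st : List Int × Int) iv =>
        ((if st.2 ∈ PySem.List.slice rest (some iv.1) none then PySem.Set.add st.1 st.2 else st.1),
         iv.2))
      (S, c)).1
    = PySem.Set.update (if c ∈ t then PySem.Set.add S c else S) (pvCollect t) := by
  intro t
  induction t with
  | nil =>
    intro k _ S c
    simp [PySem.List.enumerate_nil, pvCollect, PySem.Set.update]
  | cons v t ih =>
    intro k h S c
    have hdrop : rest.drop (k + 1) = t := by
      have := congrArg List.tail h
      simpa [List.tail_drop] using this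
    have hslice : PySem.List.slice rest (some (k : Int)) none = v :: t := by
      rw [PySem.List.slice_from_natCast, h]
    rw [PySem.List.enumerate_cons]
    simp only [List.foldl_cons]
    have hcast : (k : Int) + 1 = ((k + 1 : Nat) : Int) := by push_cast; ring
    rw [hcast, ih (k + 1) hdrop]
    by_cases hc : c ∈ v :: t
    · simp only [hslice, if_pos hc, pvCollect]
      by_cases hv : v ∈ t <;>
        simp [hv, hc, PySem.Set.update] at *
    · simp only [hslice, if_neg hc, pvCollect]
      have hc' : c ∉ v :: t := hc
      by_cases hv : v ∈ t <;> simp [hv, PySem.Set.update]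

-- conditional-add fold = update on the filtered list
theorem pvFoldl_condAdd (p : Int → Bool) : ∀ (xs : List Int) (S : List Int),
    xs.foldl (fun m x => if p x then PySem.Set.add m x else m) S
    = PySem.Set.update S (xs.filter p) := by
  intro xs
  induction xs with
  | nil => intro S; simp [PySem.Set.update]
  | cons x xs ih =>
    intro S
    by_cases hx : p x <;> simp [hx, ih, PySem.Set.update]

theorem pvUpdate_dedup_congr (xs ys S : List Int)
    (h : PySem.Set.ofList xs = PySem.Set.ofList ys) :
    PySem.Set.update S xs = PySem.Set.update S ys := by
  rw [PySem.Set.update_eq_append_filter, PySem.Set.update_eq_append_filter, h]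

-- ofList of pvCollect = duplicated elements of l in first-occurrence order
theorem pvDedup_collect : ∀ (l : List Int),
    PySem.Set.ofList (pvCollect l)
    = (PySem.Set.ofList l).filter (fun x => decide (1 < l.count x)) := by
  intro l
  induction l with
  | nil => simp [pvCollect]
  | cons v t ih =>
    by_cases hv : v ∈ t
    · have hc : 1 < (v :: t).count v := by
        have h1 : 0 < t.count v := List.count_pos_iff.mpr hv
        simp only [List.count_cons_self]; omega
      have hstep : pvCollect (v :: t) = v :: pvCollect t := by simp [pvCollect, hv]
      rw [hstep, PySem.Set.ofList_cons, ih, PySem.Set.ofList_cons]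
      simp only [List.filter_cons, hc, decide_true]
      congr 1
      simp only [PySem.Set.discard, List.filter_filter]
      refine List.filter_congr ?_
      intro x hx
      by_cases hxv : x = v
      · simp [hxv]
      · have : (v :: t).count x = t.count x := by
          simp [Ne.symm hxv]
        simp [this, Bool.and_comm]
    · have hstep : pvCollect (v :: t) = pvCollect t := by simp [pvCollect, hv]
      have hc : ¬ 1 < (v :: t).count v := by
        have h1 : t.count v = 0 := List.count_eq_zero.mpr hv
        simp [h1]
      rw [hstep, ih, PySem.Set.ofList_cons]
      simp only [List.filter_cons, hc, decide_false]
      have hnm : v ∉ PySem.Set.ofList t := by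
        simp [PySem.Set.mem_ofList, hv]
      have hdisc : (PySem.Set.ofList t).discard v = PySem.Set.ofList t := by
        simp only [PySem.Set.discard]
        refine List.filter_eq_self.mpr ?_
        intro x hx
        simp only [Bool.not_eq_eq_eq_not, Bool.not_true, beq_eq_false_iff_ne]
        exact fun hxv => hnm (hxv ▸ hx)
      rw [hdisc]
      refine List.filter_congr ?_
      intro x hx
      have hxv : x ≠ v := fun h => hnm (h ▸ hx)
      have : (v :: t).count x = t.count x := by
        simp [Ne.symm hxv]
      simp [this]

-- ===== VERDICT (by name: the statement is the Claim_ definition above) =====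
theorem list_matching_keys_spec : Claim_equal_list_matching_keys := by
  intro src_list _ hpre
  unfold Spec_list_matching_keys
  rcases src_list.eq_nil_or_concat with rfl | ⟨rest, last, rfl⟩
  · exact absurd rfl hpre
  · simp only [List.concat_eq_append]
    unfold list_matching_keys list_matching_keys_alt
    rw [PySem.List.pop?_last, PySem.List.pyGet?_neg_one_append_singleton]
    simp only [PySem.List.slice_to_neg_one, List.dropLast_concat]
    have hA := pvA_loop rest rest 0 rfl PySem.Set.empty last
    simp only [Nat.cast_zero] at hA
    rw [hA]
    -- B side: the counting fold is Dict.counter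
    have hcounter : rest.foldl (fun (d : PySem.Dict Int Int) x => d.modify x 0 (fun c => c + 1))
        PySem.Dict.empty = PySem.Dict.counter rest := rfl
    rw [hcounter, PySem.Dict.items_counter, List.foldl_map]
    have hfold := pvFoldl_condAdd (fun x => decide ((1 : Int) < (rest.count x : Int)))
        (PySem.Set.ofList rest)
        (if last ∈ rest then PySem.Set.add PySem.Set.empty last else PySem.Set.empty)
    simp only [decide_eq_true_eq] at hfold
    rw [hfold]
    refine pvUpdate_dedup_congr _ _ _ ?_
    rw [pvDedup_collect]
    have hnd : (List.filter (fun x => decide ((1 : Int) < (rest.count x : Int)))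
        (PySem.Set.ofList rest)).Nodup := (PySem.Set.nodup_ofList rest).filter _
    rw [PySem.Set.ofList_eq_self_of_nodup _ hnd]
    refine List.filter_congr ?_
    intro x _
    simp [Nat.one_lt_cast]
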